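-- pv_equiv track=rewrite | github.com/sixiaoyou/LeetCode-Python | source_code/SourceCode_2023/1-February/LeetCode2500_DeleteGreatestValueInEachRow.py | deleteGreatestValueV3
-- ===== SOURCE A (Python) =====
-- from typing import List
--
-- def deleteGreatestValueV3(grid: List[List[int]]) -> int:
--     res = 0
--     grid = list(map(lambda x: sorted(x), grid))
--     for i in range(len(grid[0])):
--         currmax = 0
--         for j in range(len(grid)):
--             currmax = max(currmax, grid[j][i])
--         res += currmax
--     return res
-- ===== SOURCE B (Python) =====
-- from typing import List
--
-- def deleteGreatestValueV3(grid: List[List[int]]) -> int: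
--     # Round-based simulation on a shrinking working copy: each round removes one
--     # value from every row (the smallest, so round k handles the k-th smallest of
--     # each row) and adds the round's maximum, clamped below at 0 exactly as A does.
--     rows = [list(r) for r in grid]
--     res = 0
--     while rows[0]:
--         best = 0
--         for r in rows:
--             v = min(r)
--             r.remove(v)
--             if v > best:
--                 best = v
--         res += best
--     return res
-- ===== Notes on version B (the rewrite author's own statement) =====
-- stated objective: alternative
-- what changed: Replaces sort-every-row-then-scan-columns by a round-based simulation on a shrinking working copy: each round removes one value from every row (its minimum) and adds the round's maximum (clamped below at 0, exactly as A's currmax=0 does); no sorting, no index arithmetic.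
import Mathlib
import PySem

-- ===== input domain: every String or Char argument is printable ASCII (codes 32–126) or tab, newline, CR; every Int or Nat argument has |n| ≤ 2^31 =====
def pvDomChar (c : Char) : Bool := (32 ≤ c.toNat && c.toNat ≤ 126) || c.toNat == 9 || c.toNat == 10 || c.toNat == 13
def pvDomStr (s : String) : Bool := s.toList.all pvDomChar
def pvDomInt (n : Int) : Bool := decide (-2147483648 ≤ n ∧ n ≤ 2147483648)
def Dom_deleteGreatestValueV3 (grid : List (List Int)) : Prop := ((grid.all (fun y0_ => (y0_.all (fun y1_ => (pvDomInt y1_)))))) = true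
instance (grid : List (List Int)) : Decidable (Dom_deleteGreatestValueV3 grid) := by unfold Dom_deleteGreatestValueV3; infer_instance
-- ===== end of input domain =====

-- B replaces sort-every-row-then-scan-columns by a round-based simulation on a shrinking
-- working copy (remove one value per row each round, add the round maximum clamped at 0,
-- as A's currmax = 0 also clamps): a genuinely different traversal of the grid, same cost class.
-- B copies each row before mutating it, so like A it leaves the caller's grid untouched (the claim is about return values).


-- ===== PORT A =====
-- literal port of A: grid = list(map(sorted, grid)); for i in range(len(grid[0])):
--   currmax = 0; for j in range(len(grid)): currmax = max(currmax, grid[j][i]); res += currmax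
-- len(grid[0]) and grid[j][i] raise IndexError exactly outside Pre_; there the port uses .getD defaults.
def deleteGreatestValueV3 (grid : List (List Int)) : Int :=
  let g := grid.map (fun x => PySem.List.sorted x (fun v => v) false)
  let n : Int := ((PySem.List.pyGet? g 0).getD []).length
  (PySem.List.pyRange 0 n 1).foldl (fun res i =>
    res + (PySem.List.pyRange 0 (g.length : Int) 1).foldl
      (fun currmax j => max currmax (PySem.List.pyGetD (PySem.List.pyGetD g j []) i 0)) 0) 0

-- ===== PORT B =====
-- v = min(r); r.remove(v)  (min([]) raises ValueError, only outside Pre_: .getD defaults there)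
def pvPopMin (r : List Int) : Int × List Int :=
  let v := (PySem.List.min? r (fun x => x)).getD 0
  (v, (PySem.List.remove? r v).getD r)

-- one pass of 'for r in rows: v = min(r); r.remove(v); if v > best: best = v'
-- (the rows list itself is rebuilt since Lean lists are immutable)
def pvRound (rows : List (List Int)) : Int × List (List Int) :=
  rows.foldl (fun p r =>
    let vr := pvPopMin r
    (if vr.1 > p.1 then vr.1 else p.1, p.2 ++ [vr.2])) (0, ([] : List (List Int)))

-- cited by pvLoop's termination proof
theorem pvPopMin_snd_length {r : List Int} (hr : r ≠ []) : (pvPopMin r).2.length < r.length := by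
  obtain ⟨m, hm⟩ : ∃ m, PySem.List.min? r (fun x => x) = some m := by
    cases h : PySem.List.min? r (fun x => x) with
    | none => exact absurd ((PySem.List.min?_eq_none_iff r _).mp h) hr
    | some m => exact ⟨m, rfl⟩
  have hmem : m ∈ r := PySem.List.min?_mem hm
  simp only [pvPopMin, hm, Option.getD_some,
    PySem.List.remove?_eq_some_erase r m hmem]
  have := List.length_erase_of_mem hmem
  have hpos : 0 < r.length := List.length_pos_iff.mpr hr
  simp [this]
  omega

theorem pvRound_snd (rows : List (List Int)) :
    (pvRound rows).2 = rows.map (fun r => (pvPopMin r).2) := by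
  unfold pvRound
  rw [PySem.List.foldl_prod_mk
    (f := fun b r => if (pvPopMin r).1 > b then (pvPopMin r).1 else b)
    (g := fun acc r => acc ++ [(pvPopMin r).2])]
  induction rows <;> simp_all

-- while rows[0]: … (rows[0] on an empty grid raises IndexError, only outside Pre_)
def pvLoop (rows : List (List Int)) (res : Int) : Int :=
  if _h : (rows.headD []).isEmpty then res
  else
    let p := pvRound rows
    pvLoop p.2 (res + p.1)
termination_by (rows.headD []).length
decreasing_by
  rw [pvRound_snd]
  cases rows with
  | nil => simp at _h
  | cons r0 rest =>
      simp only [List.map_cons, List.headD_cons]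
      exact pvPopMin_snd_length (by simpa using _h)

def deleteGreatestValueV3_alt (grid : List (List Int)) : Int :=
  let rows := grid.map (fun r => r)   -- rows = [list(r) for r in grid]: copying is the identity on immutable lists
  pvLoop rows 0

-- ===== PRECONDITION & SPEC =====
-- Pre_ excludes exactly the inputs where A raises IndexError: the empty grid (grid[0])
-- and grids in which some row is shorter than the first row (grid[j][i] out of range).
def Pre_deleteGreatestValueV3 (grid : List (List Int)) : Prop :=
  grid ≠ [] ∧ ∀ r ∈ grid, (grid.headD []).length ≤ r.length
instance (grid : List (List Int)) : Decidable (Pre_deleteGreatestValueV3 grid) := by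
  unfold Pre_deleteGreatestValueV3; infer_instance

def pvWitness_deleteGreatestValueV3 : List (List Int) := [[1, 2], [4, 3]]

def Spec_deleteGreatestValueV3 (grid : List (List Int)) (out : Int) : Prop := out = deleteGreatestValueV3_alt grid
instance (grid : List (List Int)) (out : Int) : Decidable (Spec_deleteGreatestValueV3 grid out) := by unfold Spec_deleteGreatestValueV3; infer_instance

-- ===== CLAIM (what is proved, stated in full; the proofs are below) =====
def Claim_equal_deleteGreatestValueV3 : Prop := ∀ (grid : List (List Int)), Dom_deleteGreatestValueV3 grid → Pre_deleteGreatestValueV3 grid → Spec_deleteGreatestValueV3 grid (deleteGreatestValueV3 grid)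

-- ===== LEMMAS AND PROOFS =====

-- the per-column running maximum both programs compute, over a list of (sorted) rows
def pvCol (g : List (List Int)) (i : Int) : Int :=
  g.foldl (fun c r => max c (PySem.List.pyGetD r i 0)) 0

-- popping the minimum of a nonempty row = taking the head of its sorted form
theorem pvPopMin_sorted {r : List Int} (hr : r ≠ []) :
    ∃ m t, PySem.List.min? r (fun x => x) = some m ∧
      PySem.List.sorted r (fun x => x) false = m :: t ∧
      PySem.List.sorted ((pvPopMin r).2) (fun x => x) false = t ∧
      (pvPopMin r).1 = m := by
  obtain ⟨m, hm⟩ : ∃ m, PySem.List.min? r (fun x => x) = some m := by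
    cases h : PySem.List.min? r (fun x => x) with
    | none => exact absurd ((PySem.List.min?_eq_none_iff r _).mp h) hr
    | some m => exact ⟨m, rfl⟩
  have hmem : m ∈ r := PySem.List.min?_mem hm
  have hmin := PySem.List.min?_isMin hm
  cases hs : PySem.List.sorted r (fun x => x) false with
  | nil => exact absurd ((PySem.List.sorted_eq_nil_iff r _ false).mp hs) hr
  | cons h t =>
    have hhr : h ∈ r := by
      have : h ∈ PySem.List.sorted r (fun x => x) false := by rw [hs]; exact List.mem_cons_self
      exact (PySem.List.mem_sorted r (fun x => x) false h).mp this
    have hhm : h = m :=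
      le_antisymm (PySem.List.key_head_sorted_le r (fun x => x) hs m hmem) (hmin h hhr)
    subst hhm
    have hperm : (h :: t).Perm r := by rw [← hs]; exact PySem.List.sorted_perm r _ false
    have hpop : pvPopMin r = (h, r.erase h) := by
      simp [pvPopMin, hm, PySem.List.remove?_eq_some_erase r h hmem]
    refine ⟨h, t, hm, rfl, ?_, by rw [hpop]⟩
    rw [hpop]
    refine PySem.List.sorted_id_eq_of_perm_of_pairwise _ _ ?_ ?_
    · have := (hperm.erase h).symm
      simpa using this.symm
    · have := PySem.List.sorted_pairwise r (fun x => x)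
      rw [hs] at this
      exact this.tail

theorem pvGetD_tail (l : List Int) (i : Int) (d : Int) (hi : 0 ≤ i) :
    PySem.List.pyGetD l.tail i d = PySem.List.pyGetD l (i + 1) d := by
  cases l with
  | nil => simp [PySem.List.pyGetD, PySem.List.pyGet?, PySem.List.pyIdx?]
  | cons x t =>
    simp only [List.tail_cons, PySem.List.pyGetD, PySem.List.pyGet?, PySem.List.pyIdx?]
    by_cases h : i < (t.length : Int)
    · have h1 : i + 1 < ((x :: t).length : Int) := by simp; omega
      simp only [if_pos hi, if_pos h, if_pos (by omega : (0:Int) ≤ i + 1), if_pos h1,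
        Option.bind_some]
      have h2 : (i + 1).toNat = i.toNat + 1 := by omega
      simp [h2]
    · have h1 : ¬ (i + 1 < ((x :: t).length : Int)) := by simp; omega
      simp [if_neg h, hi, (by omega : (0 : Int) ≤ i + 1)]

theorem pvRound_fst (rows : List (List Int)) :
    (pvRound rows).1 = rows.foldl (fun b r => max b (pvPopMin r).1) 0 := by
  unfold pvRound
  rw [PySem.List.foldl_prod_mk
    (f := fun b r => if (pvPopMin r).1 > b then (pvPopMin r).1 else b)
    (g := fun acc r => acc ++ [(pvPopMin r).2])]
  dsimp only
  refine PySem.List.foldl_congr_mem _ _ _ _ ?_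
  intro acc x _
  by_cases h : (pvPopMin x).1 > acc
  · simp [h, max_eq_right (le_of_lt h)]
  · simp [h, max_eq_left (not_lt.mp h)]

theorem pvGetD_cons_zero (x : Int) (xs : List Int) (d : Int) :
    PySem.List.pyGetD (x :: xs) 0 d = x := by
  simp [PySem.List.pyGetD, PySem.List.pyGet?, PySem.List.pyIdx?]

theorem pvCol_map_tail (g : List (List Int)) (i : Int) (hi : 0 ≤ i) :
    pvCol (g.map List.tail) i = pvCol g (i + 1) := by
  unfold pvCol
  rw [List.foldl_map]
  exact PySem.List.foldl_congr_mem _ _ _ _ (fun acc x _ => by rw [pvGetD_tail _ _ _ hi])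

theorem pvLoop_eq (n : Nat) : ∀ (rows : List (List Int)) (res : Int),
    (rows.headD []).length = n → (∀ r ∈ rows, n ≤ r.length) →
    pvLoop rows res = res + ((PySem.List.pyRange 0 (n : Int) 1).map
      (pvCol (rows.map (fun r => PySem.List.sorted r (fun x => x) false)))).sum := by
  induction n with
  | zero =>
    intro rows res hlen _
    rw [pvLoop]
    have hemp : (rows.headD []).isEmpty := by
      simpa [List.isEmpty_iff, List.length_eq_zero_iff] using hlen
    rw [dif_pos hemp]
    simp [PySem.List.pyRange_one_eq_nil (le_refl (0 : Int))]
  | succ n ih =>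
    intro rows res hlen hall
    cases rows with
    | nil => simp at hlen
    | cons r0 rest =>
      simp only [List.headD_cons] at hlen
      have h0 : r0 ≠ [] := by intro h; subst h; simp at hlen
      have hne : ∀ r ∈ r0 :: rest, r ≠ [] := by
        intro r hr h; subst h
        have := hall [] hr; simp at this
      -- the per-row facts of one round
      have hfact : ∀ r ∈ r0 :: rest,
          PySem.List.sorted ((pvPopMin r).2) (fun x => x) false
            = (PySem.List.sorted r (fun x => x) false).tail ∧
          (pvPopMin r).1 = PySem.List.pyGetD (PySem.List.sorted r (fun x => x) false) 0 0 ∧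
          (pvPopMin r).2.length + 1 = r.length := by
        intro r hr
        obtain ⟨m, t, _, hs, hs', hv⟩ := pvPopMin_sorted (hne r hr)
        have l1 : (PySem.List.sorted r (fun x => x) false).length = r.length :=
          PySem.List.length_sorted r _ false
        have l2 : (PySem.List.sorted ((pvPopMin r).2) (fun x => x) false).length
            = (pvPopMin r).2.length := PySem.List.length_sorted _ _ false
        refine ⟨by rw [hs', hs, List.tail_cons], by rw [hv, hs, pvGetD_cons_zero], ?_⟩
        rw [hs] at l1; rw [hs'] at l2
        simp at l1 l2; omega
      rw [pvLoop]
      have hh : ¬ (((r0 :: rest).headD []).isEmpty) := by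
        simpa [List.isEmpty_iff] using h0
      rw [dif_neg hh]
      have hrows' := pvRound_snd (r0 :: rest)
      have hlen' : (((pvRound (r0 :: rest)).2).headD []).length = n := by
        rw [hrows']
        simp only [List.map_cons, List.headD_cons]
        have := (hfact r0 List.mem_cons_self).2.2
        omega
      have hall' : ∀ r' ∈ (pvRound (r0 :: rest)).2, n ≤ r'.length := by
        rw [hrows']
        intro r' h
        obtain ⟨r, hr, rfl⟩ := List.mem_map.mp h
        have := (hfact r hr).2.2
        have := hall r hr
        omega
      have hIH := ih (pvRound (r0 :: rest)).2 (res + (pvRound (r0 :: rest)).1) hlen' hall'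
      -- the sorted rows after the round are the tails of the sorted rows before it
      have hmap : ((pvRound (r0 :: rest)).2).map (fun r => PySem.List.sorted r (fun x => x) false)
          = (((r0 :: rest)).map (fun r => PySem.List.sorted r (fun x => x) false)).map List.tail := by
        rw [hrows', List.map_map, List.map_map]
        exact List.map_congr_left (fun r hr => (hfact r hr).1)
      rw [hmap] at hIH
      rw [hIH]
      -- the round's best is column 0 of the sorted rows
      have hbest : (pvRound (r0 :: rest)).1
          = pvCol (((r0 :: rest)).map (fun r => PySem.List.sorted r (fun x => x) false)) 0 := by
        rw [pvRound_fst]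
        unfold pvCol
        rw [List.foldl_map]
        exact PySem.List.foldl_congr_mem _ _ _ _ (fun acc r hr => by rw [(hfact r hr).2.1])
      rw [hbest]
      -- shift the column sum: range (n+1) = 0 :: (1..n), tails shift indices by one
      have hshift : ((PySem.List.pyRange 0 (n : Int) 1).map
            (pvCol ((((r0 :: rest)).map (fun r => PySem.List.sorted r (fun x => x) false)).map List.tail))).sum
          = ((PySem.List.pyRange 1 ((n : Int) + 1) 1).map
            (pvCol (((r0 :: rest)).map (fun r => PySem.List.sorted r (fun x => x) false)))).sum := by
        rw [PySem.List.pyRange_one 0 (n : Int), PySem.List.pyRange_one 1 ((n : Int) + 1)]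
        have hn0 : ((n : Int) - 0).toNat = n := by omega
        have hn1 : ((n : Int) + 1 - 1).toNat = n := by omega
        rw [hn0, hn1]
        simp only [List.map_map]
        refine congrArg List.sum (List.map_congr_left ?_)
        intro k _
        simp only [Function.comp]
        rw [← List.map_map]
        rw [pvCol_map_tail _ _ (by omega : (0 : Int) ≤ 0 + (k : Int))]
        congr 1
        omega
      have hcons : PySem.List.pyRange 0 (((n : Nat) + 1 : Nat) : Int) 1
          = 0 :: PySem.List.pyRange 1 ((n : Int) + 1) 1 := by
        push_cast
        exact PySem.List.pyRange_one_cons (by omega)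
      rw [hshift, hcons]
      simp only [List.map_cons, List.sum_cons]
      ring

theorem deleteGreatestValueV3_spec : Claim_equal_deleteGreatestValueV3 := by
  intro grid _ hpre
  obtain ⟨hne, hall⟩ := hpre
  cases grid with
  | nil => exact absurd rfl hne
  | cons r0 rest =>
    simp only [List.headD_cons] at hall
    unfold Spec_deleteGreatestValueV3 deleteGreatestValueV3 deleteGreatestValueV3_alt
    simp only [List.map_id']
    rw [pvLoop_eq r0.length (r0 :: rest) 0 (by simp) hall]
    have hget : (PySem.List.pyGet? ((r0 :: rest).map
        (fun x => PySem.List.sorted x (fun v => v) false)) 0).getD []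
        = PySem.List.sorted r0 (fun v => v) false := by
      simp [PySem.List.pyGet?, PySem.List.pyIdx?]
    rw [hget, PySem.List.length_sorted]
    have hinner : ∀ (res i : Int),
        res + (PySem.List.pyRange 0 (((r0 :: rest).map
            (fun x => PySem.List.sorted x (fun v => v) false)).length : Int) 1).foldl
          (fun currmax j => max currmax (PySem.List.pyGetD (PySem.List.pyGetD ((r0 :: rest).map
            (fun x => PySem.List.sorted x (fun v => v) false)) j []) i 0)) 0
        = res + pvCol ((r0 :: rest).map (fun x => PySem.List.sorted x (fun v => v) false)) i := by
      intro res i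
      rw [PySem.List.foldl_pyRange_zero_pyGetD' _ ([] : List Int)
        (fun c r => max c (PySem.List.pyGetD r i 0)) 0]
      rfl
    rw [PySem.List.foldl_congr_mem _ _
      (fun res i => res + pvCol ((r0 :: rest).map
        (fun x => PySem.List.sorted x (fun v => v) false)) i) _
      (fun res i _ => hinner res i)]
    rw [PySem.List.foldl_add]
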